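-- pv_equiv track=rewrite | github.com/zhaole0606/CS61A-sp24 | projects/hog/hog.py | sus_points
-- ===== SOURCE A (Python) =====
-- def is_prime(n):
--     """Return whether N is prime."""
--     if n == 1:
--         return False
--     k = 2
--     while k < n:
--         if n % k == 0:
--             return False
--         k += 1
--     return True
--
-- def num_factors(n):
--     """Return the number of factors of N, including 1 and N itself."""
--     # BEGIN PROBLEM 4
--     sum=0
--     b=n
--     while b>0:
--         if n%b==0:
--             sum+=1
--         b-=1
--     return sum
--     "*** YOUR CODE HERE ***"
--
-- def sus_points(score):
--     """Return the new score of a player taking into account the Sus Fuss rule."""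
--     # BEGIN PROBLEM 4
--     num=num_factors(score)
--     if num==3 or num==4:
--         # 是sus，找到下一个素数
--         score+=1
--         while is_prime(score) == False:
--             score+=1
--         return score
--     else:
--         return score
--     "*** YOUR CODE HERE ***"
-- ===== SOURCE B (Python) =====
-- def _isqrt(n):
--     """Largest r with r*r <= n, for n >= 1 (loop, no imports)."""
--     r = 0
--     while (r + 1) * (r + 1) <= n:
--         r += 1
--     return r
--
-- def is_prime(n):
--     """Return whether N is prime: no divisor in 2..isqrt(n)."""
--     return n >= 2 and all(n % k != 0 for k in range(2, _isqrt(n) + 1))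
--
-- def num_factors(n):
--     """Return the number of factors of N: pair small divisors i <= sqrt(n) with n // i."""
--     if n <= 0:
--         return 0
--     r = _isqrt(n)
--     small = [i for i in range(1, r + 1) if n % i == 0]
--     return 2 * len(small) - (1 if r * r == n else 0)
--
-- def sus_points(score):
--     """Return the new score of a player taking into account the Sus Fuss rule."""
--     if num_factors(score) not in (3, 4):
--         return score
--     n = score + 1
--     while not is_prime(n):
--         n += 1
--     return n
-- ===== Notes on version B (the rewrite author's own statement) =====
-- stated objective: faster
-- what changed: B counts divisors by an integer-sqrt bound and a list of small divisors paired with their cofactors (2*len(small) minus a perfect-square correction), and tests primality with all() over range(2, isqrt(n)+1), instead of A's full scans up to n.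
import Mathlib
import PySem

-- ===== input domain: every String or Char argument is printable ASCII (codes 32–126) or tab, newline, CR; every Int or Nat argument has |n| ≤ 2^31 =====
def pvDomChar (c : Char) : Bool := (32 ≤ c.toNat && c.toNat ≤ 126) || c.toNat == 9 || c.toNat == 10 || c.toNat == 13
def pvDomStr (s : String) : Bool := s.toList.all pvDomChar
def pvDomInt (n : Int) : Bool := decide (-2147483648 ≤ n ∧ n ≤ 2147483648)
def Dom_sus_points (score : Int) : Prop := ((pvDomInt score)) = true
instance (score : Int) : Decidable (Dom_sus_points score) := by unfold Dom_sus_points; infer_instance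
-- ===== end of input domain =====

-- B replaces A's O(n) divisor scan and O(n) primality trial division by O(√n) versions:
-- an integer-sqrt loop, a small-divisor list paired with cofactors (2·|small| − square
-- correction), and all() over range(2, isqrt(n)+1); return values are identical.

-- ===== PORT A =====
-- is_prime: k = 2; while k < n: if n % k == 0: return False; k += 1; return True
def isPrimeA_loop (n k : Int) : Bool :=
  if k < n then
    if PySem.Int.mod n k = 0 then false
    else isPrimeA_loop n (k + 1)
  else true
termination_by (n - k).toNat
decreasing_by omega

def isPrimeA (n : Int) : Bool :=
  if n = 1 then false else isPrimeA_loop n 2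

-- one-directional loop fact, needed (via exists_primeA_ge) for nextPrimeA's termination
theorem isPrimeA_loop_of (n k : Int)
    (h : ∀ j : Int, k ≤ j → j < n → ¬ PySem.Int.mod n j = 0) :
    isPrimeA_loop n k = true := by
  unfold isPrimeA_loop
  split
  · rename_i hk
    rw [if_neg (h k le_rfl hk)]
    exact isPrimeA_loop_of n (k + 1) (fun j hj hj' => h j (by omega) hj')
  · rfl
termination_by (n - k).toNat
decreasing_by omega

theorem isPrimeA_of_prime (p : Nat) (hp : p.Prime) : isPrimeA (p : Int) = true := by
  unfold isPrimeA
  have h2 : 2 ≤ p := hp.two_le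
  rw [if_neg (by omega)]
  apply isPrimeA_loop_of
  intro j hj hj'
  rw [PySem.Int.mod_eq_emod_of_pos (by omega)]
  intro hmod
  have hdvd : j ∣ (p : Int) := Int.dvd_of_emod_eq_zero hmod
  have hjn : j = (j.toNat : Int) := by omega
  rw [hjn] at hdvd
  have : j.toNat ∣ p := Int.natCast_dvd_natCast.mp hdvd
  have := (Nat.prime_def_lt'.mp hp).2 j.toNat (by omega) (by omega)
  exact this ‹j.toNat ∣ p›

-- the search for the next prime terminates: some m ahead satisfies isPrimeA
theorem exists_primeA_ge (s : Int) : ∃ m : Nat, isPrimeA (s + m) = true := by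
  obtain ⟨p, hle, hp⟩ := Nat.exists_infinite_primes s.toNat
  refine ⟨((p : Int) - s).toNat, ?_⟩
  have hs : s ≤ (p : Int) := by omega
  have : s + (((p : Int) - s).toNat : Int) = (p : Int) := by omega
  rw [this]
  exact isPrimeA_of_prime p hp

-- score += 1; while is_prime(score) == False: score += 1; return score
def nextPrimeA (s : Int) : Int :=
  if isPrimeA s = false then nextPrimeA (s + 1) else s
termination_by Nat.find (exists_primeA_ge s)
decreasing_by
  rename_i hfalse
  have hspec := Nat.find_spec (exists_primeA_ge s)
  set m := Nat.find (exists_primeA_ge s) with hm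
  have hm0 : m ≠ 0 := by
    intro h0
    rw [h0] at hspec
    simp at hspec
    rw [hspec] at hfalse
    simp at hfalse
  obtain ⟨m', hm'⟩ : ∃ m', m = m' + 1 := ⟨m - 1, by omega⟩
  have : isPrimeA ((s + 1) + (m' : Int)) = true := by
    have he : (s + 1) + (m' : Int) = s + (m : Int) := by omega
    rw [he]; exact hspec
  have := Nat.find_le (h := exists_primeA_ge (s + 1)) this
  omega

-- num_factors: sum = 0; b = n; while b > 0: if n % b == 0: sum += 1; b -= 1; return sum
def numFactorsA_loop (n b acc : Int) : Int :=
  if 0 < b then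
    numFactorsA_loop n (b - 1) (if PySem.Int.mod n b = 0 then acc + 1 else acc)
  else acc
termination_by b.toNat
decreasing_by omega

def numFactorsA (n : Int) : Int := numFactorsA_loop n n 0

def sus_points (score : Int) : Int :=
  let num := numFactorsA score
  if num = 3 ∨ num = 4 then nextPrimeA (score + 1) else score

-- ===== PORT B =====
-- _isqrt: r = 0; while (r+1)*(r+1) <= n: r += 1; return r
def isqrtB_loop (n r : Int) : Int :=
  if (r + 1) * (r + 1) ≤ n then isqrtB_loop n (r + 1) else r
termination_by (n - r).toNat
decreasing_by
  rename_i h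
  have h0 : 0 ≤ (r + 1) * (r + 1) := mul_self_nonneg _
  have h2 : r + 1 ≤ n := by
    rcases le_or_gt 1 (r + 1) with h1 | h1
    · nlinarith
    · omega
  omega

def isqrtB (n : Int) : Int := isqrtB_loop n 0

-- characterisation of the loop's result, needed for exists_primeB_ge (nextPrimeB's termination)
theorem isqrtB_loop_spec (n r : Int) (h0 : 0 ≤ r) (h1 : r * r ≤ n) :
    0 ≤ isqrtB_loop n r ∧ isqrtB_loop n r * isqrtB_loop n r ≤ n ∧
      n < (isqrtB_loop n r + 1) * (isqrtB_loop n r + 1) := by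
  rw [isqrtB_loop]
  split
  · rename_i h
    exact isqrtB_loop_spec n (r + 1) (by omega) h
  · rename_i h
    exact ⟨h0, h1, by omega⟩
termination_by (n - r).toNat
decreasing_by
  rename_i h
  have h2 : r + 1 ≤ n := by nlinarith
  omega

theorem isqrtB_eq_sqrt (n : Int) (hn : 0 ≤ n) : isqrtB n = (Nat.sqrt n.toNat : Int) := by
  obtain ⟨hs0, hs1, hs2⟩ := isqrtB_loop_spec n 0 le_rfl (by simpa using hn)
  unfold isqrtB
  set s := isqrtB_loop n 0 with hs
  have hle : s.toNat ≤ Nat.sqrt n.toNat := by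
    apply Nat.le_sqrt.mpr
    have : (s.toNat : Int) * (s.toNat : Int) ≤ (n.toNat : Int) := by
      rw [Int.toNat_of_nonneg hs0, Int.toNat_of_nonneg hn]; exact hs1
    exact_mod_cast this
  have hge : Nat.sqrt n.toNat ≤ s.toNat := by
    have hlt : n.toNat < (s.toNat + 1) * (s.toNat + 1) := by
      have : (n.toNat : Int) < ((s.toNat : Int) + 1) * ((s.toNat : Int) + 1) := by
        rw [Int.toNat_of_nonneg hs0, Int.toNat_of_nonneg hn]; exact hs2
      exact_mod_cast this
    have := Nat.sqrt_lt'.mpr (by rw [pow_two]; exact hlt)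
    omega
  omega

-- is_prime: n >= 2 and all(n % k != 0 for k in range(2, _isqrt(n) + 1))
def isPrimeB (n : Int) : Bool :=
  decide (2 ≤ n) &&
    (PySem.List.pyRange 2 (isqrtB n + 1) 1).all (fun k => !(PySem.Int.mod n k == 0))

theorem pv_mod_zero_iff (n j : Int) (hj : 0 < j) (hn : 0 ≤ n) :
    PySem.Int.mod n j = 0 ↔ j.toNat ∣ n.toNat := by
  rw [PySem.Int.mod_eq_zero_iff_dvd]
  constructor
  · intro hdvd
    have : (j.toNat : Int) ∣ (n.toNat : Int) := by
      rwa [Int.toNat_of_nonneg (by omega), Int.toNat_of_nonneg hn]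
    exact Int.natCast_dvd_natCast.mp this
  · intro h
    have : (j.toNat : Int) ∣ (n.toNat : Int) := Int.natCast_dvd_natCast.mpr h
    rwa [Int.toNat_of_nonneg (by omega), Int.toNat_of_nonneg hn] at this

theorem isPrimeB_iff_prime (n : Int) (h2 : 2 ≤ n) :
    isPrimeB n = true ↔ Nat.Prime n.toNat := by
  unfold isPrimeB
  rw [isqrtB_eq_sqrt n (by omega)]
  simp only [Bool.and_eq_true, decide_eq_true_eq, List.all_eq_true,
    PySem.List.mem_pyRange_one, Bool.not_eq_eq_eq_not, Bool.not_true, beq_eq_false_iff_ne,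
    ne_eq]
  rw [Nat.prime_def_le_sqrt]
  constructor
  · intro ⟨_, h⟩
    refine ⟨by omega, ?_⟩
    intro m hm hmle hdvd
    refine h (m : Int) ⟨by omega, by omega⟩ ?_
    rw [pv_mod_zero_iff n (m : Int) (by omega) (by omega)]
    simpa using hdvd
  · intro ⟨_, h⟩
    refine ⟨h2, ?_⟩
    rintro j ⟨hj2, hjlt⟩ hmod
    rw [pv_mod_zero_iff n j (by omega) (by omega)] at hmod
    exact h j.toNat (by omega) (by omega) hmod

theorem exists_primeB_ge (s : Int) : ∃ m : Nat, isPrimeB (s + m) = true := by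
  obtain ⟨p, hle, hp⟩ := Nat.exists_infinite_primes (max s.toNat 2)
  refine ⟨((p : Int) - s).toNat, ?_⟩
  have h2 : 2 ≤ p := le_trans (le_max_right _ _) hle
  have : s + (((p : Int) - s).toNat : Int) = (p : Int) := by
    have : s.toNat ≤ p := le_trans (le_max_left _ _) hle
    omega
  rw [this, isPrimeB_iff_prime (p : Int) (by exact_mod_cast h2)]
  simpa using hp

-- n = score + 1; while not is_prime(n): n += 1; return n
def nextPrimeB (s : Int) : Int :=
  if isPrimeB s then s else nextPrimeB (s + 1)
termination_by Nat.find (exists_primeB_ge s)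
decreasing_by
  rename_i hfalse
  have hspec := Nat.find_spec (exists_primeB_ge s)
  set m := Nat.find (exists_primeB_ge s) with hm
  have hm0 : m ≠ 0 := by
    intro h0
    rw [h0] at hspec
    simp at hspec
    rw [hspec] at hfalse
    simp at hfalse
  obtain ⟨m', hm'⟩ : ∃ m', m = m' + 1 := ⟨m - 1, by omega⟩
  have : isPrimeB ((s + 1) + (m' : Int)) = true := by
    have he : (s + 1) + (m' : Int) = s + (m : Int) := by omega
    rw [he]; exact hspec
  have := Nat.find_le (h := exists_primeB_ge (s + 1)) this
  omega

-- num_factors: if n <= 0: 0; r = _isqrt(n); small = [i for i in range(1, r+1) if n % i == 0];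
--              return 2 * len(small) - (1 if r*r == n else 0)
def numFactorsB (n : Int) : Int :=
  if n ≤ 0 then 0
  else
    let r := isqrtB n
    let small := (PySem.List.pyRange 1 (r + 1) 1).filter (fun i => PySem.Int.mod n i == 0)
    2 * (small.length : Int) - (if r * r = n then 1 else 0)

def sus_points_alt (score : Int) : Int :=
  if ¬ (numFactorsB score = 3 ∨ numFactorsB score = 4) then score
  else nextPrimeB (score + 1)

-- ===== PRECONDITION & SPEC =====
def Spec_sus_points (score : Int) (out : Int) : Prop := out = sus_points_alt score
instance (score : Int) (out : Int) : Decidable (Spec_sus_points score out) := by unfold Spec_sus_points; infer_instance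

-- ===== CLAIM (what is proved, stated in full; the proofs are below) =====
def Claim_equal_sus_points : Prop := ∀ (score : Int), Dom_sus_points score → Spec_sus_points score (sus_points score)

-- ===== LEMMAS AND PROOFS =====

theorem isPrimeA_loop_sound (n k : Int) (h : isPrimeA_loop n k = true) :
    ∀ j : Int, k ≤ j → j < n → ¬ PySem.Int.mod n j = 0 := by
  intro j hj hj'
  rw [isPrimeA_loop] at h
  by_cases hk : k < n
  · rw [if_pos hk] at h
    by_cases hm : PySem.Int.mod n k = 0
    · rw [if_pos hm] at h; exact absurd h (by simp)
    · rw [if_neg hm] at h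
      rcases eq_or_lt_of_le hj with rfl | hlt
      · exact hm
      · exact isPrimeA_loop_sound n (k + 1) h j (by omega) hj'
  · omega
termination_by (n - k).toNat
decreasing_by omega

theorem isPrimeA_iff_prime (n : Int) (h2 : 2 ≤ n) :
    isPrimeA n = true ↔ Nat.Prime n.toNat := by
  unfold isPrimeA
  rw [if_neg (by omega)]
  constructor
  · intro h
    rw [Nat.prime_def_lt']
    refine ⟨by omega, ?_⟩
    intro m hm hmlt hdvd
    refine isPrimeA_loop_sound n 2 h (m : Int) (by omega) (by omega) ?_
    rw [pv_mod_zero_iff n (m : Int) (by omega) (by omega)]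
    simpa using hdvd
  · intro hp
    apply isPrimeA_loop_of
    intro j hj hjlt hmod
    rw [pv_mod_zero_iff n j (by omega) (by omega)] at hmod
    exact absurd hmod ((Nat.prime_def_lt'.mp hp).2 j.toNat (by omega) (by omega))

theorem nextPrime_eq (s : Int) (hs : 2 ≤ s) : nextPrimeA s = nextPrimeB s := by
  rw [nextPrimeA, nextPrimeB]
  have hab : isPrimeB s = isPrimeA s := by
    have hiff := (isPrimeA_iff_prime s hs).trans (isPrimeB_iff_prime s hs).symm
    cases hA : isPrimeA s
    · cases hB : isPrimeB s
      · rfl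
      · exact absurd (hiff.mpr hB) (by simp [hA])
    · exact hiff.mp hA
  rw [hab]
  cases hA : isPrimeA s
  · simp only [Bool.false_eq_true, if_true, if_false]
    exact nextPrime_eq (s + 1) (by omega)
  · simp
termination_by Nat.find (exists_primeA_ge s)
decreasing_by
  have hfalse : isPrimeA s = false := by assumption
  have hspec := Nat.find_spec (exists_primeA_ge s)
  set m := Nat.find (exists_primeA_ge s) with hm
  have hm0 : m ≠ 0 := by
    intro h0
    rw [h0] at hspec
    simp at hspec
    rw [hspec] at hfalse
    simp at hfalse
  obtain ⟨m', hm'⟩ : ∃ m', m = m' + 1 := ⟨m - 1, by omega⟩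
  have : isPrimeA ((s + 1) + (m' : Int)) = true := by
    have he : (s + 1) + (m' : Int) = s + (m : Int) := by omega
    rw [he]; exact hspec
  have := Nat.find_le (h := exists_primeA_ge (s + 1)) this
  omega

theorem numFactorsA_loop_spec (n b acc : Int) (hb0 : 0 ≤ b) :
    numFactorsA_loop n b acc =
      acc + (((Finset.Icc 1 b.toNat).filter (fun d : Nat => PySem.Int.mod n (d : Int) = 0)).card : Int) := by
  rw [numFactorsA_loop]
  by_cases hb : 0 < b
  · rw [if_pos hb]
    rw [numFactorsA_loop_spec n (b - 1) _ (by omega)]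
    have hins : Finset.Icc 1 b.toNat = insert b.toNat (Finset.Icc 1 (b - 1).toNat) := by
      ext x; simp only [Finset.mem_Icc, Finset.mem_insert]; omega
    have hnot : b.toNat ∉ (Finset.Icc 1 (b - 1).toNat).filter (fun d : Nat => PySem.Int.mod n (d : Int) = 0) := by
      simp only [Finset.mem_filter, Finset.mem_Icc]; omega
    have hcast : ((b.toNat : Int)) = b := Int.toNat_of_nonneg (by omega)
    rw [hins, Finset.filter_insert]
    by_cases hm : PySem.Int.mod n b = 0
    · rw [if_pos hm, if_pos (by rw [hcast]; exact hm), Finset.card_insert_of_notMem hnot]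
      push_cast
      ring
    · rw [if_neg hm, if_neg (by rw [hcast]; exact hm)]
  · rw [if_neg hb]
    have h0 : b.toNat = 0 := by omega
    rw [h0]
    simp
termination_by b.toNat
decreasing_by omega

-- the length of B's small-divisor list, as a Finset card over [1, s]
theorem pv_len_filter_pyRange (s : Nat) (f : Int → Bool) :
    ((PySem.List.pyRange 1 ((s : Int) + 1) 1).filter f).length
      = ((Finset.Icc 1 s).filter (fun d : Nat => f (d : Int))).card := by
  induction s with
  | zero => simp [PySem.List.pyRange_one_eq_nil]
  | succ t ih =>
    have hsplit : PySem.List.pyRange 1 ((t : Int) + 1 + 1) 1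
        = PySem.List.pyRange 1 ((t : Int) + 1) 1 ++ [(t : Int) + 1] := by
      exact PySem.List.pyRange_one_succ_right (by omega)
    have hcast : ((t : Int) + 1 + 1) = (((t + 1 : Nat) : Int) + 1) := by push_cast; ring
    rw [← hcast, hsplit, List.filter_append, List.length_append, ih]
    have hins : Finset.Icc 1 (t + 1) = insert (t + 1) (Finset.Icc 1 t) := by
      ext x; simp only [Finset.mem_Icc, Finset.mem_insert]; omega
    have hnot : t + 1 ∉ (Finset.Icc 1 t).filter (fun d : Nat => f (d : Int)) := by
      simp only [Finset.mem_filter, Finset.mem_Icc]; omega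
    rw [hins, Finset.filter_insert]
    by_cases hf : f ((t : Int) + 1)
    · rw [if_pos (by push_cast; exact hf), Finset.card_insert_of_notMem hnot]
      simp [hf]
    · rw [if_neg (by push_cast; exact hf)]
      simp [hf]

-- the pairing d ↦ N / d between large (d·d > N) and small (d·d < N) divisors
theorem pv_divisor_pairing (N : Nat) (hN : 1 ≤ N) :
    (((Finset.Icc 1 N).filter (fun d => d ∣ N ∧ ¬ d ≤ Nat.sqrt N)).card)
      = ((Finset.Icc 1 N).filter (fun d => d ∣ N ∧ d ≤ Nat.sqrt N ∧ ¬ d * d = N)).card := by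
  apply Finset.card_bij' (fun d _ => N / d) (fun e _ => N / e)
  · intro d hd
    simp only [Finset.mem_filter, Finset.mem_Icc] at hd ⊢
    obtain ⟨⟨hd1, hdN⟩, hdvd, hgt⟩ := hd
    have hgt' : Nat.sqrt N < d := by omega
    have hlt : N < d * d := Nat.sqrt_lt.mp hgt'
    obtain ⟨e, he⟩ := hdvd
    have hdpos : 0 < d := by omega
    have hepos : 0 < e := by nlinarith
    have hde : N / d = e := by rw [he]; exact Nat.mul_div_cancel_left e hdpos
    rw [hde]
    have hesq : e * e < N := by nlinarith
    refine ⟨⟨by omega, by nlinarith⟩, ⟨d, by rw [he]; ring⟩, Nat.le_sqrt.mpr (by omega), by omega⟩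
  · intro e he
    simp only [Finset.mem_filter, Finset.mem_Icc] at he ⊢
    obtain ⟨⟨he1, heN⟩, hdvd, hle, hne⟩ := he
    have hesq : e * e < N := by
      have := Nat.le_sqrt.mp hle
      omega
    obtain ⟨d, hd⟩ := hdvd
    have hepos : 0 < e := by omega
    have hdpos : 0 < d := by nlinarith
    have hed : N / e = d := by rw [hd]; exact Nat.mul_div_cancel_left d hepos
    rw [hed]
    have hdsq : N < d * d := by nlinarith
    refine ⟨⟨by omega, by nlinarith⟩, ⟨e, by rw [hd]; ring⟩, ?_⟩
    intro hcon
    have := Nat.le_sqrt.mp hcon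
    omega
  · intro d hd
    simp only [Finset.mem_filter, Finset.mem_Icc] at hd
    exact Nat.div_div_self hd.2.1 (by omega)
  · intro e he
    simp only [Finset.mem_filter, Finset.mem_Icc] at he
    exact Nat.div_div_self he.2.1 (by omega)

-- the number of small divisors with d·d = N: 1 for a perfect square, else 0
theorem pv_square_divisor_card (N : Nat) (hN : 1 ≤ N) :
    ((Finset.Icc 1 N).filter (fun d => d ∣ N ∧ d ≤ Nat.sqrt N ∧ d * d = N)).card
      = (if Nat.sqrt N * Nat.sqrt N = N then 1 else 0) := by
  by_cases hsq : Nat.sqrt N * Nat.sqrt N = N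
  · rw [if_pos hsq]
    have : (Finset.Icc 1 N).filter (fun d => d ∣ N ∧ d ≤ Nat.sqrt N ∧ d * d = N)
        = {Nat.sqrt N} := by
      ext d
      simp only [Finset.mem_filter, Finset.mem_Icc, Finset.mem_singleton]
      constructor
      · rintro ⟨⟨h1, h2⟩, _, hle, hdd⟩
        nlinarith
      · rintro rfl
        have h1 : 1 ≤ Nat.sqrt N := by
          rcases Nat.eq_zero_or_pos (Nat.sqrt N) with h | h
          · rw [h] at hsq; omega
          · omega
        exact ⟨⟨h1, by nlinarith⟩, ⟨Nat.sqrt N, hsq.symm⟩, le_rfl, hsq⟩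
    rw [this, Finset.card_singleton]
  · rw [if_neg hsq]
    rw [Finset.card_eq_zero]
    ext d
    simp only [Finset.mem_filter, Finset.mem_Icc, Finset.notMem_empty, iff_false]
    rintro ⟨⟨h1, h2⟩, _, hle, hdd⟩
    have hge := Nat.sqrt_le_sqrt (le_of_eq hdd.symm)
    have : Nat.sqrt (d * d) = d := by rw [show d * d = d ^ 2 by ring]; exact Nat.sqrt_eq' d
    have hdq : d = Nat.sqrt N := by omega
    rw [hdq] at hdd
    exact hsq hdd

-- total divisor count in [1,N] = 2·(small divisors) − (1 if N is a perfect square)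
theorem pv_count_via_small (N : Nat) (hN : 1 ≤ N) :
    (((Finset.Icc 1 N).filter (fun d => d ∣ N)).card : Int)
      = 2 * (((Finset.Icc 1 (Nat.sqrt N)).filter (fun d => d ∣ N)).card : Int)
        - (if Nat.sqrt N * Nat.sqrt N = N then 1 else 0) := by
  have htotal := Finset.card_filter_add_card_filter_not
    (s := (Finset.Icc 1 N).filter (fun d => d ∣ N)) (fun d => d ≤ Nat.sqrt N)
  rw [Finset.filter_filter, Finset.filter_filter] at htotal
  have hpair := pv_divisor_pairing N hN
  have hsmall_split := Finset.card_filter_add_card_filter_not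
    (s := (Finset.Icc 1 N).filter (fun d => d ∣ N ∧ d ≤ Nat.sqrt N)) (fun d => d * d = N)
  rw [Finset.filter_filter, Finset.filter_filter] at hsmall_split
  have hsq_card := pv_square_divisor_card N hN
  -- identify the small-divisor filter over [1,N] with the filter over [1,√N]
  have hsm : ((Finset.Icc 1 N).filter (fun d => d ∣ N ∧ d ≤ Nat.sqrt N)).card
      = ((Finset.Icc 1 (Nat.sqrt N)).filter (fun d => d ∣ N)).card := by
    congr 1
    ext d
    simp only [Finset.mem_filter, Finset.mem_Icc]
    constructor
    · rintro ⟨⟨h1, _⟩, hdvd, hle⟩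
      exact ⟨⟨h1, hle⟩, hdvd⟩
    · rintro ⟨⟨h1, hle⟩, hdvd⟩
      exact ⟨⟨h1, le_trans hle (Nat.sqrt_le_self N)⟩, hdvd, hle⟩
  -- rewrite equal-filter props so omega can combine the counts
  have e1 : ((Finset.Icc 1 N).filter (fun d => d ∣ N ∧ d ≤ Nat.sqrt N ∧ d * d = N)).card
      = ((Finset.Icc 1 N).filter (fun d => (d ∣ N ∧ d ≤ Nat.sqrt N) ∧ d * d = N)).card := by
    congr 1; ext d; simp only [Finset.mem_filter]; tauto
  have e2 : ((Finset.Icc 1 N).filter (fun d => d ∣ N ∧ d ≤ Nat.sqrt N ∧ ¬ d * d = N)).card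
      = ((Finset.Icc 1 N).filter (fun d => (d ∣ N ∧ d ≤ Nat.sqrt N) ∧ ¬ d * d = N)).card := by
    congr 1; ext d; simp only [Finset.mem_filter]; tauto
  rw [e1] at hsq_card
  rw [e2] at hpair
  by_cases hsq : Nat.sqrt N * Nat.sqrt N = N
  · rw [if_pos hsq]
    rw [if_pos hsq] at hsq_card
    omega
  · rw [if_neg hsq]
    rw [if_neg hsq] at hsq_card
    omega

theorem numFactors_eq (n : Int) (hn : 1 ≤ n) : numFactorsA n = numFactorsB n := by
  unfold numFactorsA numFactorsB
  rw [if_neg (by omega)]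
  rw [numFactorsA_loop_spec n n 0 (by omega)]
  rw [isqrtB_eq_sqrt n (by omega)]
  have hfilters : ∀ M : Nat, ((Finset.Icc 1 M).filter (fun d : Nat => PySem.Int.mod n (d : Int) = 0))
      = ((Finset.Icc 1 M).filter (fun d => d ∣ n.toNat)) := by
    intro M
    apply Finset.filter_congr
    intro d hd
    simp only [Finset.mem_Icc] at hd
    rw [pv_mod_zero_iff n (d : Int) (by omega) (by omega)]
    simp
  have hlen := pv_len_filter_pyRange (Nat.sqrt n.toNat)
    (fun i => PySem.Int.mod n i == 0)
  simp only at hlen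
  simp only [hlen]
  have hB : ((Finset.Icc 1 (Nat.sqrt n.toNat)).filter
        (fun d : Nat => (PySem.Int.mod n (d : Int) == 0)))
      = ((Finset.Icc 1 (Nat.sqrt n.toNat)).filter (fun d => d ∣ n.toNat)) := by
    apply Finset.filter_congr
    intro d hd
    simp only [Finset.mem_Icc] at hd
    rw [beq_iff_eq, pv_mod_zero_iff n (d : Int) (by omega) (by omega)]
    simp
  rw [hB, hfilters n.toNat, pv_count_via_small n.toNat (by omega)]
  have hsqiff : ((Nat.sqrt n.toNat : Int) * (Nat.sqrt n.toNat : Int) = n)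
      ↔ (Nat.sqrt n.toNat * Nat.sqrt n.toNat = n.toNat) := by
    rw [show ((Nat.sqrt n.toNat : Int)) * ((Nat.sqrt n.toNat : Int))
        = ((Nat.sqrt n.toNat * Nat.sqrt n.toNat : Nat) : Int) by push_cast; ring]
    omega
  by_cases hsq : Nat.sqrt n.toNat * Nat.sqrt n.toNat = n.toNat
  · rw [if_pos hsq, if_pos (hsqiff.mpr hsq)]
    omega
  · rw [if_neg hsq, if_neg (fun hc => hsq (hsqiff.mp hc))]
    omega

theorem numFactorsA_nonpos (n : Int) (hn : n ≤ 0) : numFactorsA n = 0 := by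
  unfold numFactorsA
  rw [numFactorsA_loop, if_neg (by omega)]

-- ===== VERDICT (by name: the statement is the Claim_ definition above) =====
theorem sus_points_spec : Claim_equal_sus_points := by
  intro score _
  unfold Spec_sus_points
  simp only [sus_points, sus_points_alt]
  by_cases hpos : 1 ≤ score
  · rw [numFactors_eq score hpos]
    by_cases h : numFactorsB score = 3 ∨ numFactorsB score = 4
    · rw [if_pos h, if_neg (not_not_intro h)]
      exact nextPrime_eq (score + 1) (by omega)
    · rw [if_neg h, if_pos h]
  · have hA := numFactorsA_nonpos score (by omega)
    have hB : numFactorsB score = 0 := by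
      unfold numFactorsB
      rw [if_pos (by omega)]
    rw [hA, hB]
    norm_num
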